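-- pv_equiv track=rewrite | github.com/gratach/distrida | src/distrida/address_system/weg.py | wegZuUInt
-- ===== SOURCE A (Python) =====
-- def wegZuUInt(weg):
--     l = len(weg)
--     i = 0
--     mul = 1
--     ges = 0
--     while i < l:
--         ges += (weg[i] + 1) * mul
--         mul *= 255
--         i += 1
--     return ges
-- ===== SOURCE B (Python) =====
-- def wegZuUInt(weg):
--     ges = 0
--     for x in reversed(weg):
--         ges = ges * 255 + (x + 1)
--     return ges
-- ===== Notes on version B (the rewrite author's own statement) =====
-- stated objective: simpler
-- what changed: Replaces the index loop with an explicit power-of-255 multiplier by Horner's method over the reversed list: the accumulator is scaled by 255 each step, so no running power variable is maintained.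
import Mathlib
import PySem

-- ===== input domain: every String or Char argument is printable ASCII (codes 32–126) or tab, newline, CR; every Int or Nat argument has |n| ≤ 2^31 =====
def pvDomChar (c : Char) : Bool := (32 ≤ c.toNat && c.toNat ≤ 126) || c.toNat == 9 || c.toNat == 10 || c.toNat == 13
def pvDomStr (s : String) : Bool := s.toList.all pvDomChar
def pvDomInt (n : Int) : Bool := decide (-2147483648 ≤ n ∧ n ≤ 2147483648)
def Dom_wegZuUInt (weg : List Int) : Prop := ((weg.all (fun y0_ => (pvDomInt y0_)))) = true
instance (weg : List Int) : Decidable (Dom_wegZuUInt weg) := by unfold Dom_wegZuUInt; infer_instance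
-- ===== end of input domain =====

-- B replaces A's index loop with its running power-of-255 multiplier by Horner's method
-- over the reversed list (accumulator scaled by 255 each step): simpler, same values.

-- ===== PORT A =====
-- A's while loop over indices 0..l-1, carrying (ges, mul); weg[i] is in range so the
-- index walk is the structural fold over the list.
def wegZuUInt (weg : List Int) : Int :=
  (weg.foldl (fun (st : Int × Int) x => (st.1 + (x + 1) * st.2, st.2 * 255)) (0, 1)).1

-- ===== PORT B =====
def wegZuUInt_alt (weg : List Int) : Int :=
  weg.reverse.foldl (fun ges x => ges * 255 + (x + 1)) 0

-- ===== PRECONDITION & SPEC =====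
def Spec_wegZuUInt (weg : List Int) (out : Int) : Prop := out = wegZuUInt_alt weg
instance (weg : List Int) (out : Int) : Decidable (Spec_wegZuUInt weg out) := by unfold Spec_wegZuUInt; infer_instance

-- ===== CLAIM (what is proved, stated in full; the proofs are below) =====
def Claim_equal_wegZuUInt : Prop := ∀ (weg : List Int), Dom_wegZuUInt weg → Spec_wegZuUInt weg (wegZuUInt weg)

-- ===== LEMMAS AND PROOFS =====
theorem wegZuUInt_alt_foldr (weg : List Int) :
    wegZuUInt_alt weg = weg.foldr (fun x g => g * 255 + (x + 1)) 0 := by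
  unfold wegZuUInt_alt
  rw [List.foldl_reverse]

theorem wegZuUInt_fold_eq (weg : List Int) : ∀ g m : Int,
    (weg.foldl (fun (st : Int × Int) x => (st.1 + (x + 1) * st.2, st.2 * 255)) (g, m)).1
      = g + m * weg.foldr (fun x g => g * 255 + (x + 1)) 0 := by
  induction weg with
  | nil => intro g m; simp
  | cons x l ih =>
      intro g m
      simp only [List.foldl_cons, List.foldr_cons, ih]
      ring

-- ===== VERDICT (by name: the statement is the Claim_ definition above) =====
theorem wegZuUInt_spec : Claim_equal_wegZuUInt := by
  intro weg _
  unfold Spec_wegZuUInt wegZuUInt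
  rw [wegZuUInt_alt_foldr, wegZuUInt_fold_eq]
  ring
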